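-- pv_equiv track=rewrite | github.com/Daniel-creator-dot/primehospital | hospital/templatetags/hospital_extras.py | _pagination_window
-- ===== SOURCE A (Python) =====
-- def _pagination_window(current, num_pages, max_visible):
--     """
--     Return a list of page numbers and None (for ellipsis) to show in pagination.
--     At most max_visible numbers; always includes 1 and num_pages when num_pages > 1.
--     """
--     if num_pages <= 0:
--         return []
--     if num_pages <= max_visible:
--         return [(i, False) for i in range(1, num_pages + 1)]  # (num, is_ellipsis)
--     half = max_visible - 4  # reserve for 1, ellipsis, ..., ellipsis, last
--     half = max(half, 3)
--     start = max(2, current - half // 2)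
--     end = min(num_pages - 1, start + half - 1)
--     if end - start + 1 < half:
--         start = max(2, end - half + 1)
--     result = []
--     result.append((1, False))
--     if start > 2:
--         result.append((None, True))
--     for i in range(start, end + 1):
--         result.append((i, False))
--     if end < num_pages - 1:
--         result.append((None, True))
--     if num_pages > 1:
--         result.append((num_pages, False))
--     return result
-- ===== SOURCE B (Python) =====
-- def _pagination_window(current, num_pages, max_visible):
--     if num_pages <= 0:
--         return []
--     if num_pages <= max_visible:
--         return [(i, False) for i in range(1, num_pages + 1)]
--     half = max(max_visible - 4, 3)
--     start = max(2, current - half // 2)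
--     end = min(num_pages - 1, start + half - 1)
--     if end - start + 1 < half:
--         start = max(2, end - half + 1)
--     # sorted list of page numbers to show; insert an ellipsis wherever
--     # two consecutive shown numbers are more than 1 apart
--     pages = [1] + list(range(start, end + 1)) + ([num_pages] if num_pages > 1 else [])
--     result = [(1, False)]
--     prev = 1
--     for n in pages[1:]:
--         if n - prev > 1:
--             result.append((None, True))
--         result.append((n, False))
--         prev = n
--     return result
-- ===== Notes on version B (the rewrite author's own statement) =====
-- stated objective: alternative
-- what changed: The explicit append-with-boundary-checks construction (1, maybe ellipsis, window loop, maybe ellipsis, last) is replaced by building the sorted list of shown page numbers and inserting an ellipsis between any two consecutive shown numbers that differ by more than 1.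
import Mathlib
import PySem

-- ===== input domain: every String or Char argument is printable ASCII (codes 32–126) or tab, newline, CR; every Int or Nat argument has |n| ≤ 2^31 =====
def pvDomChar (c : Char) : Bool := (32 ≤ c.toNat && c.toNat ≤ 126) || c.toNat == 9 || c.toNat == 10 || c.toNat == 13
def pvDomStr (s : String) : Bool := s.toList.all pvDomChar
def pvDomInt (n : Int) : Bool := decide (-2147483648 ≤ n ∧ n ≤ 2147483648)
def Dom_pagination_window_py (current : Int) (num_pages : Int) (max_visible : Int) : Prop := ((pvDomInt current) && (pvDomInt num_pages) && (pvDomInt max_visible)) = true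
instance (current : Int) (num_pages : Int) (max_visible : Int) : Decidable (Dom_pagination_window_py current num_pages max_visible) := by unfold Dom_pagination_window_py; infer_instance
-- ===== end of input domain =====

-- B replaces A's explicit append-with-boundary-checks construction by a gap-scan
-- over the sorted list of shown page numbers (alternative decomposition, same cost).

-- ===== PORT A =====
def pagination_window_py (current : Int) (num_pages : Int) (max_visible : Int) : List (Option Int × Bool) :=
  if num_pages ≤ 0 then []
  else if num_pages ≤ max_visible then
    (PySem.List.pyRange 1 (num_pages + 1) 1).map (fun i => (some i, false))
  else
    let half := max (max_visible - 4) 3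
    let start0 := max 2 (current - PySem.Int.floordiv half 2)
    let e := min (num_pages - 1) (start0 + half - 1)
    let start := if e - start0 + 1 < half then max 2 (e - half + 1) else start0
    let r1 : List (Option Int × Bool) := [(some 1, false)]
    let r2 := if start > 2 then r1 ++ [((none : Option Int), true)] else r1
    let r3 := r2 ++ (PySem.List.pyRange start (e + 1) 1).map (fun i => (some i, false))
    let r4 := if e < num_pages - 1 then r3 ++ [((none : Option Int), true)] else r3
    if num_pages > 1 then r4 ++ [(some num_pages, false)] else r4

-- ===== PORT B =====
-- the for-loop of Source B over pages[1:] with accumulator `prev`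
def pvGapScan (prev : Int) (rest : List Int) : List (Option Int × Bool) :=
  match rest with
  | [] => []
  | n :: t =>
      (if n - prev > 1 then [((none : Option Int), true), (some n, false)] else [(some n, false)])
        ++ pvGapScan n t

def pagination_window_py_alt (current : Int) (num_pages : Int) (max_visible : Int) : List (Option Int × Bool) :=
  if num_pages ≤ 0 then []
  else if num_pages ≤ max_visible then
    (PySem.List.pyRange 1 (num_pages + 1) 1).map (fun i => (some i, false))
  else
    let half := max (max_visible - 4) 3
    let start0 := max 2 (current - PySem.Int.floordiv half 2)
    let e := min (num_pages - 1) (start0 + half - 1)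
    let start := if e - start0 + 1 < half then max 2 (e - half + 1) else start0
    let pages : List Int :=
      [1] ++ PySem.List.pyRange start (e + 1) 1 ++ (if num_pages > 1 then [num_pages] else [])
    (some 1, false) :: pvGapScan 1 (pages.drop 1)

-- ===== PRECONDITION & SPEC =====
def Spec_pagination_window_py (current : Int) (num_pages : Int) (max_visible : Int) (out : List (Option Int × Bool)) : Prop := out = pagination_window_py_alt current num_pages max_visible
instance (current : Int) (num_pages : Int) (max_visible : Int) (out : List (Option Int × Bool)) : Decidable (Spec_pagination_window_py current num_pages max_visible out) := by unfold Spec_pagination_window_py; infer_instance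

-- ===== CLAIM (what is proved, stated in full; the proofs are below) =====
def Claim_equal_pagination_window_py : Prop := ∀ (current : Int) (num_pages : Int) (max_visible : Int), Dom_pagination_window_py current num_pages max_visible → Spec_pagination_window_py current num_pages max_visible (pagination_window_py current num_pages max_visible)

-- ===== LEMMAS AND PROOFS =====

-- scanning a consecutive run that starts right after `prev` inserts no ellipsis
lemma pvGapScan_range (k : Nat) : ∀ (a b : Int) (t : List Int), (b - (a + 1)).toNat = k →
    pvGapScan a (PySem.List.pyRange (a + 1) b 1 ++ t)
      = (PySem.List.pyRange (a + 1) b 1).map (fun i => ((some i : Option Int), false))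
        ++ pvGapScan (max a (b - 1)) t := by
  induction k with
  | zero =>
      intro a b t h
      rw [PySem.List.pyRange_one_eq_nil (by omega)]
      simp [max_eq_left (by omega : b - 1 ≤ a)]
  | succ k ih =>
      intro a b t h
      rw [PySem.List.pyRange_one_cons (by omega : a + 1 < b)]
      have h2 : (b - (a + 1 + 1)).toNat = k := by omega
      simp only [pvGapScan, List.cons_append]
      rw [if_neg (by omega : ¬ (a + 1 - a > 1))]
      rw [ih (a + 1) b t h2]
      have hmax1 : max (a + 1) (b - 1) = b - 1 := by omega
      have hmax2 : max a (b - 1) = b - 1 := by omega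
      simp [hmax1, hmax2]

theorem pagination_window_py_spec : Claim_equal_pagination_window_py := by
  intro current num_pages max_visible _
  unfold Spec_pagination_window_py pagination_window_py pagination_window_py_alt
  by_cases h0 : num_pages ≤ 0
  · simp [h0]
  by_cases h1 : num_pages ≤ max_visible
  · simp [h0, h1]
  simp only [if_neg h0, if_neg h1]
  set half := max (max_visible - 4) 3 with hhalf
  set start0 := max 2 (current - PySem.Int.floordiv half 2) with hstart0
  set e := min (num_pages - 1) (start0 + half - 1) with he
  set start := if e - start0 + 1 < half then max 2 (e - half + 1) else start0 with hstart
  have hhalf3 : 3 ≤ half := le_max_right _ _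
  have hs02 : 2 ≤ start0 := le_max_left _ _
  have hs2 : 2 ≤ start := by
    rw [hstart]; split
    · exact le_max_left _ _
    · exact hs02
  have henp : e ≤ num_pages - 1 := min_le_left _ _
  simp only [List.cons_append, List.nil_append, List.drop_succ_cons, List.drop_zero]
  by_cases hwin : start ≤ e
  · -- non-empty window
    have hnp : 1 < num_pages := by omega
    rw [PySem.List.pyRange_one_cons (by omega : start < e + 1)]
    simp only [List.cons_append, pvGapScan]
    rw [pvGapScan_range (e + 1 - (start + 1)).toNat start (e + 1) _ rfl]
    have hmax : max start (e + 1 - 1) = e := by omega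
    rw [hmax]
    simp only [if_pos hnp, pvGapScan, List.append_nil]
    by_cases hgap1 : start > 2
    · rw [if_pos (by omega : start - 1 > 1), if_pos hgap1]
      by_cases hgap2 : e < num_pages - 1
      · rw [if_pos (by omega : num_pages - e > 1), if_pos hgap2]; simp
      · rw [if_neg (by omega : ¬ (num_pages - e > 1)), if_neg hgap2]; simp
    · rw [if_neg (by omega : ¬ (start - 1 > 1)), if_neg hgap1]
      by_cases hgap2 : e < num_pages - 1
      · rw [if_pos (by omega : num_pages - e > 1), if_pos hgap2]; simp
      · rw [if_neg (by omega : ¬ (num_pages - e > 1)), if_neg hgap2]; simp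
  · -- empty window: here e = num_pages - 1 ≤ 1 and start = 2
    have hse : e < start := by omega
    have he4 : e < 4 := by omega
    have hmin : e = num_pages - 1 := by omega
    have hstart2 : start = 2 := by
      rw [hstart]
      have hreset : e - start0 + 1 < half := by
        by_contra hc
        have : start = start0 := by rw [hstart, if_neg hc]
        omega
      rw [if_pos hreset]
      omega
    rw [PySem.List.pyRange_one_eq_nil (by omega : e + 1 ≤ start)]
    rw [if_neg (by omega : ¬ (start > 2)), if_neg (by omega : ¬ (e < num_pages - 1))]
    by_cases hnp : num_pages > 1
    · have hnp2 : num_pages = 2 := by omega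
      rw [if_pos hnp, if_pos hnp]
      simp [pvGapScan, hnp2]
    · rw [if_neg hnp, if_neg hnp]
      simp [pvGapScan]
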